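-- pv_equiv track=rewrite | github.com/krimeano/aoc-2025 | src/day_10/day_10.py | move_smallest_column
-- ===== SOURCE A (Python) =====
-- from math import inf
--
-- def move_smallest_column(matrix: list[list[int]], corner=0) -> list[list[int]]:
--     width = len(matrix[0])
--     height = len(matrix)
--
--     min_ix = -1
--     min_value = height
--     min_total = inf
--
--     for ix in range(corner, width - 1):
--         value = sum([matrix[jy][ix] != 0 for jy in range(corner, height)])
--         total = sum([abs(matrix[jy][ix]) for jy in range(corner, height)])
--
--         if 0 < value < min_value or (value == min_value and total < min_total):
--             min_value = value
--             min_ix = ix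
--
--     if min_ix < 1:
--         return matrix
--
--     matrix = [row[:corner] + [row[min_ix]] + row[corner + 1:min_ix] + [row[corner + 1]] + row[min_ix + 1:] for row in matrix]
--     for row in matrix:
--         row[-1] = -row[-1]
--     return matrix
-- ===== SOURCE B (Python) =====
-- def move_smallest_column(matrix, corner=0):
--     width = len(matrix[0])
--     n = width - 1 - corner
--     if n <= 0:
--         return matrix
--     counts = [0] * n
--     for row in matrix[corner:]:
--         counts = [c + (row[corner + k] != 0) for k, c in enumerate(counts)]
--     best = len(matrix)
--     min_ix = -1
--     for k, c in enumerate(counts):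
--         if 0 < c <= best:
--             best = c
--             min_ix = corner + k
--     if min_ix < 1:
--         return matrix
--     return [row[:corner] + [row[min_ix]] + row[corner + 1:min_ix] + [row[corner + 1]]
--             + row[min_ix + 1:-1] + [-row[-1]] for row in matrix]
-- ===== Notes on version B (the rewrite author's own statement) =====
-- stated objective: alternative
-- what changed: B replaces A's per-column nested scans (two list-comprehension sums per column, one of them dead) by a single row-major pass accumulating a per-column nonzero-count table, selects the target column from that table with the same skip-zeros/minimum/last-wins rule, and builds the result in one comprehension with the negated last element inlined instead of A's build-then-mutate second pass.
-- outside the precondition, e.g. on move_smallest_column([[1, 2, 3], [4, 5]], 0): A returns [[2, 2, -3], [5, -5]], B returns [[2, 2, -3], [5, 5, -5]]; on move_smallest_column([[2, 0, 1, 2]], -1): A returns [[2, 0, 1, 2]], B returns [[2, 0, 1, 1, 2, 0, 2, -2]]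
import Mathlib
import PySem

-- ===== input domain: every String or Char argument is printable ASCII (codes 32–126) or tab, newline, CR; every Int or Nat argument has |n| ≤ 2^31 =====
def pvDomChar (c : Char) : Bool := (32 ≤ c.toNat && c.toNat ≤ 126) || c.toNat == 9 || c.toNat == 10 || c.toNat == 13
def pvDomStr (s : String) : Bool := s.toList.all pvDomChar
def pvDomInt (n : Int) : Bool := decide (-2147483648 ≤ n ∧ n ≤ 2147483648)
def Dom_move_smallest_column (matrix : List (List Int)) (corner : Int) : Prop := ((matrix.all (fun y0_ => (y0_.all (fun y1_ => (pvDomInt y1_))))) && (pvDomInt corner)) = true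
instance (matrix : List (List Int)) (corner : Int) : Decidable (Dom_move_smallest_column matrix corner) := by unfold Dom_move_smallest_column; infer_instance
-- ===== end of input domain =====

-- B replaces A's per-column nested sums by one row-major pass that accumulates a per-column
-- nonzero-count table, picks the target column from that table, and builds the result in a
-- single comprehension (negated last element included) instead of a comprehension plus a
-- mutation pass; equal return value on Pre_, no caller-visible mutation in either version.

-- ===== PORT A =====
def move_smallest_column (matrix : List (List Int)) (corner : Int) : List (List Int) :=
  let width : Int := (((PySem.List.pyGet? matrix 0).getD []).length : Int)
  let height : Int := (matrix.length : Int)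
  -- min_total = inf and is never reassigned, so the comparison 'total < min_total' is always True
  let st : Int × Int :=
    (PySem.List.pyRange corner (width - 1) 1).foldl
      (fun st ix =>
        let value : Int :=
          ((PySem.List.pyRange corner height 1).map
            (fun jy => if PySem.List.pyGetD (PySem.List.pyGetD matrix jy []) ix 0 ≠ 0 then (1 : Int) else 0)).sum
        let _total : Int :=
          ((PySem.List.pyRange corner height 1).map
            (fun jy => |PySem.List.pyGetD (PySem.List.pyGetD matrix jy []) ix 0|)).sum
        if (0 < value ∧ value < st.2) ∨ value = st.2 then (ix, value) else st)
      (-1, height)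
  if st.1 < 1 then matrix
  else
    let matrix' := matrix.map (fun row =>
      PySem.List.slice row none (some corner) ++ [PySem.List.pyGetD row st.1 0] ++
      PySem.List.slice row (some (corner + 1)) (some st.1) ++ [PySem.List.pyGetD row (corner + 1) 0] ++
      PySem.List.slice row (some (st.1 + 1)) none)
    -- row[-1] = -row[-1] on each (freshly built) row
    matrix'.map (fun row => row.dropLast ++ [-(row.getLast?.getD 0)])

-- ===== PORT B =====
def move_smallest_column_alt (matrix : List (List Int)) (corner : Int) : List (List Int) :=
  let width : Int := (((PySem.List.pyGet? matrix 0).getD []).length : Int)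
  let n : Int := width - 1 - corner
  if n ≤ 0 then matrix
  else
    let counts : List Int :=
      (PySem.List.slice matrix (some corner) none).foldl
        (fun cs row =>
          (PySem.List.enumerate cs 0).map
            (fun kc => kc.2 + (if PySem.List.pyGetD row (corner + kc.1) 0 ≠ 0 then (1 : Int) else 0)))
        (List.replicate n.toNat 0)
    let sel : Int × Int :=
      (PySem.List.enumerate counts 0).foldl
        (fun (st : Int × Int) kc =>
          if 0 < kc.2 ∧ kc.2 ≤ st.1 then (kc.2, corner + kc.1) else st)
        ((matrix.length : Int), -1)
    if sel.2 < 1 then matrix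
    else
      matrix.map (fun row =>
        PySem.List.slice row none (some corner) ++ [PySem.List.pyGetD row sel.2 0] ++
        PySem.List.slice row (some (corner + 1)) (some sel.2) ++ [PySem.List.pyGetD row (corner + 1) 0] ++
        PySem.List.slice row (some (sel.2 + 1)) (some (-1)) ++ [-(PySem.List.pyGetD row (-1) 0)])

-- ===== PRECONDITION & SPEC =====
-- Pre_ excludes the empty matrix, ragged matrices whose columns the loop actually scans
-- (A raises IndexError whenever its column scan or the column move reaches a too-short row;
-- ragged matrices with corner ≥ width-1 are admitted, the loop is empty there) and negative
-- corner (outside the function's natural domain: A silently reads columns through Python's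
-- negative-index wraparound there).
def Pre_move_smallest_column (matrix : List (List Int)) (corner : Int) : Prop :=
  matrix ≠ [] ∧ 0 ≤ corner ∧
    (((matrix.headD []).length : Int) - 1 ≤ corner ∨ ∀ row ∈ matrix, row.length = (matrix.headD []).length)
instance (matrix : List (List Int)) (corner : Int) : Decidable (Pre_move_smallest_column matrix corner) := by unfold Pre_move_smallest_column; infer_instance

def pvWitness_move_smallest_column : List (List Int) × Int := ([[1, 2, 3], [0, 5, 6]], 0)

def Spec_move_smallest_column (matrix : List (List Int)) (corner : Int) (out : List (List Int)) : Prop := out = move_smallest_column_alt matrix corner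
instance (matrix : List (List Int)) (corner : Int) (out : List (List Int)) : Decidable (Spec_move_smallest_column matrix corner out) := by unfold Spec_move_smallest_column; infer_instance

-- ===== CLAIM (what is proved, stated in full; the proofs are below) =====
def Claim_equal_move_smallest_column : Prop := ∀ (matrix : List (List Int)) (corner : Int), Dom_move_smallest_column matrix corner → Pre_move_smallest_column matrix corner → Spec_move_smallest_column matrix corner (move_smallest_column matrix corner)

-- ===== LEMMAS AND PROOFS =====

-- indicator abbreviation used throughout
def pvInd (row : List Int) (ix : Int) : Int := if PySem.List.pyGetD row ix 0 ≠ 0 then 1 else 0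

-- one row-update of the counts table, elementwise
lemma pv_step_getD (cs : List Int) (row : List Int) (corner : Int) (k : Nat) (hk : k < cs.length) :
    ((PySem.List.enumerate cs 0).map
      (fun kc => kc.2 + (if PySem.List.pyGetD row (corner + kc.1) 0 ≠ 0 then (1:Int) else 0))).getD k 0
    = cs.getD k 0 + pvInd row (corner + k) := by
  have h1 : ((PySem.List.enumerate cs 0).map
      (fun kc => kc.2 + (if PySem.List.pyGetD row (corner + kc.1) 0 ≠ 0 then (1:Int) else 0)))[k]?
      = some (cs[k] + pvInd row (corner + k)) := by
    rw [List.getElem?_map, PySem.List.getElem?_enumerate]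
    simp [List.getElem?_eq_getElem hk, pvInd]
  rw [List.getD_eq_getElem?_getD, h1, List.getD_eq_getElem?_getD, List.getElem?_eq_getElem hk]
  rfl

lemma pv_step_len (cs : List Int) (row : List Int) (corner : Int) :
    ((PySem.List.enumerate cs 0).map
      (fun kc => kc.2 + (if PySem.List.pyGetD row (corner + kc.1) 0 ≠ 0 then (1:Int) else 0))).length = cs.length := by
  simp [PySem.List.length_enumerate]

-- the row loop accumulates, per column k, the sum of indicators over the rows
lemma pv_counts_char (corner : Int) (rows : List (List Int)) :
    ∀ (cs : List Int),
    (rows.foldl (fun cs row => (PySem.List.enumerate cs 0).map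
        (fun kc => kc.2 + (if PySem.List.pyGetD row (corner + kc.1) 0 ≠ 0 then (1:Int) else 0))) cs).length = cs.length
  ∧ ∀ (k : Nat), k < cs.length →
    (rows.foldl (fun cs row => (PySem.List.enumerate cs 0).map
        (fun kc => kc.2 + (if PySem.List.pyGetD row (corner + kc.1) 0 ≠ 0 then (1:Int) else 0))) cs).getD k 0
    = cs.getD k 0 + (rows.map (fun row => pvInd row (corner + k))).sum := by
  induction rows with
  | nil => intro cs; simp
  | cons r rs ih =>
    intro cs
    constructor
    · rw [List.foldl_cons, (ih _).1, pv_step_len]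
    · intro k hk
      have hk' : k < ((PySem.List.enumerate cs 0).map
        (fun kc => kc.2 + (if PySem.List.pyGetD r (corner + kc.1) 0 ≠ 0 then (1:Int) else 0))).length := by
        simpa [pv_step_len] using hk
      rw [List.foldl_cons, (ih _).2 k hk', pv_step_getD cs r corner k hk]
      simp [add_assoc]

-- helper: a map over range by getD is a map over the list
lemma pv_map_range_getD {α : Type} [Inhabited α] (l : List α) (f : α → Int) (d : α) :
    (List.range l.length).map (fun k => f (l.getD k d)) = l.map f := by
  induction l with
  | nil => simp
  | cons a t ih => simp [List.range_succ_eq_map, List.map_map]; exact ih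

-- A's per-column sum over pyRange(corner, height) equals a sum over the dropped-row list
lemma pv_val_rows (matrix : List (List Int)) (corner : Int) (hc : 0 ≤ corner)
    (g : List Int → Int) :
    ((PySem.List.pyRange corner (matrix.length : Int) 1).map
      (fun jy => g (PySem.List.pyGetD matrix jy []))).sum
    = ((matrix.drop corner.toNat).map g).sum := by
  rw [PySem.List.pyRange_one, List.map_map]
  have hm : ((matrix.length : Int) - corner).toNat = (matrix.drop corner.toNat).length := by
    simp; omega
  rw [hm]
  have : ∀ k, k ∈ List.range (matrix.drop corner.toNat).length →
      g (PySem.List.pyGetD matrix (corner + (k:Int)) []) = g ((matrix.drop corner.toNat).getD k []) := by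
    intro k hk
    have : corner + (k : Int) = ((corner.toNat + k : Nat) : Int) := by omega
    rw [this, PySem.List.pyGetD_natCast]
    congr 1
    simp at hk
    rw [List.getD_eq_getElem?_getD, List.getD_eq_getElem?_getD, List.getElem?_drop]
  rw [show ((fun jy => g (PySem.List.pyGetD matrix jy [])) ∘ fun k : Nat => corner + (k:Int))
      = fun k : Nat => g (PySem.List.pyGetD matrix (corner + (k:Int)) []) from rfl]
  rw [List.map_congr_left this, pv_map_range_getD]

-- selection fold: A's running (min_ix, min_value) is B's running (best, min_ix) swapped
lemma pv_sel_swap (w idx : Nat → Int) (l : List Nat) :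
    ∀ (i0 m0 : Int), 0 < m0 →
    l.foldl (fun st k => if (0 < w k ∧ w k < st.2) ∨ w k = st.2 then (idx k, w k) else st) (i0, m0)
    = Prod.swap (l.foldl (fun st k => if 0 < w k ∧ w k ≤ st.1 then (w k, idx k) else st) (m0, i0)) := by
  induction l with
  | nil => intro i0 m0 _; rfl
  | cons k t ih =>
    intro i0 m0 hm
    by_cases h : 0 < w k ∧ w k ≤ m0
    · have h' : (0 < w k ∧ w k < m0) ∨ w k = m0 := by omega
      simp only [List.foldl_cons, if_pos h, if_pos h']
      exact ih _ _ h.1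
    · have h' : ¬ ((0 < w k ∧ w k < m0) ∨ w k = m0) := by omega
      simp only [List.foldl_cons, if_neg h, if_neg h']
      exact ih _ _ hm

-- the selected index is the initial one or comes from the scanned list
lemma pv_sel_mem (w idx : Nat → Int) (l : List Nat) :
    ∀ (i0 m0 : Int),
    (l.foldl (fun st k => if 0 < w k ∧ w k ≤ st.1 then (w k, idx k) else st) (m0, i0)).2 = i0
    ∨ ∃ k ∈ l, (l.foldl (fun st k => if 0 < w k ∧ w k ≤ st.1 then (w k, idx k) else st) (m0, i0)).2 = idx k := by
  induction l with
  | nil => intro i0 m0; left; rfl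
  | cons k t ih =>
    intro i0 m0
    simp only [List.foldl_cons]
    by_cases h : 0 < w k ∧ w k ≤ m0
    · rw [if_pos h]
      rcases ih (idx k) (w k) with h1 | ⟨k', hk', h2⟩
      · right; exact ⟨k, by simp, h1⟩
      · right; exact ⟨k', by simp [hk'], h2⟩
    · rw [if_neg h]
      rcases ih i0 m0 with h1 | ⟨k', hk', h2⟩
      · left; exact h1
      · right; exact ⟨k', by simp [hk'], h2⟩

-- per-row: slicing off the last element and negating it in one comprehension equals
-- A's build-then-mutate on that row
lemma pv_row (row : List Int) (corner i : Int) (h1 : 1 ≤ i)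
    (hiW : i + 2 ≤ (row.length : Int)) :
    (PySem.List.slice row none (some corner) ++ [PySem.List.pyGetD row i 0] ++
      PySem.List.slice row (some (corner + 1)) (some i) ++ [PySem.List.pyGetD row (corner + 1) 0] ++
      PySem.List.slice row (some (i + 1)) none).dropLast
    ++ [-((PySem.List.slice row none (some corner) ++ [PySem.List.pyGetD row i 0] ++
      PySem.List.slice row (some (corner + 1)) (some i) ++ [PySem.List.pyGetD row (corner + 1) 0] ++
      PySem.List.slice row (some (i + 1)) none).getLast?.getD 0)]
    = PySem.List.slice row none (some corner) ++ [PySem.List.pyGetD row i 0] ++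
      PySem.List.slice row (some (corner + 1)) (some i) ++ [PySem.List.pyGetD row (corner + 1) 0] ++
      PySem.List.slice row (some (i + 1)) (some (-1)) ++ [-(PySem.List.pyGetD row (-1) 0)] := by
  have hT : PySem.List.slice row (some (i + 1)) none = row.drop (i+1).toNat :=
    PySem.List.slice_from row (by omega)
  have hTne : row.drop (i+1).toNat ≠ [] := by
    have : (i+1).toNat < row.length := by omega
    simp [List.drop_eq_nil_iff]; omega
  have hrne : row ≠ [] := by
    intro h; rw [h] at hiW; simp at hiW; omega
  -- last element
  have hlast : (row.drop (i+1).toNat).getLast? = row.getLast? := by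
    rw [List.getLast?_drop]
    have : ¬ row.length ≤ (i+1).toNat := by omega
    simp [this]
  have hget : PySem.List.pyGetD row (-1) 0 = row.getLast hrne := PySem.List.pyGetD_neg_one row 0 hrne
  -- the tail slice with stop -1 is dropLast of the tail slice
  have hslice : PySem.List.slice row (some (i + 1)) (some (-1)) = (row.drop (i+1).toNat).dropLast := by
    simp only [PySem.List.slice, PySem.List.clampIdx]
    have h2 : ¬ ((-1 : Int) < 0) = False := by simp
    rw [List.dropLast_eq_take]
    simp only [if_pos (show (-1:Int) < 0 by norm_num), if_neg (show ¬ ((row.length : Int) + (-1) < 0) by omega)]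
    simp only [if_neg (show ¬ ((i+1 : Int) < 0) by omega)]
    have : min (i+1).toNat row.length = (i+1).toNat := by omega
    rw [this]
    have : ((row.length : Int) + (-1)).toNat = row.length - 1 := by omega
    rw [this]
    congr 1
    simp
    omega
  -- assemble
  rw [hT, List.dropLast_append_of_ne_nil hTne, List.getLast?_append_of_ne_nil _ hTne, hlast,
    hslice, hget]
  have h5 : row.getLast?.getD 0 = row.getLast hrne := by
    rw [List.getLast?_eq_some_getLast hrne]; rfl
  rw [h5]

theorem pv_main (matrix : List (List Int)) (corner : Int) (hne : matrix ≠ [])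
    (hc : 0 ≤ corner)
    (hro : ((matrix.headD []).length : Int) - 1 ≤ corner ∨ ∀ row ∈ matrix, row.length = (matrix.headD []).length) :
    move_smallest_column matrix corner = move_smallest_column_alt matrix corner := by
  have hW : ((PySem.List.pyGet? matrix 0).getD []).length = (matrix.headD []).length := by
    cases matrix with
    | nil => exact absurd rfl hne
    | cons r rs => rw [PySem.List.pyGet?_zero_cons]; rfl
  set W : Nat := (matrix.headD []).length with hWdef
  by_cases hn : (W:Int) - 1 - corner ≤ 0
  · -- empty column range: both return the matrix unchanged
    have hA : move_smallest_column matrix corner = matrix := by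
      simp only [move_smallest_column, hW]
      rw [PySem.List.pyRange_one_eq_nil (a := corner) (b := (W:Int) - 1) (by omega)]
      simp
    have hB : move_smallest_column_alt matrix corner = matrix := by
      simp only [move_smallest_column_alt, hW]
      rw [if_pos hn]
    rw [hA, hB]
  · -- at least one candidate column exists; the loop runs, so the matrix is rectangular
    have hrect : ∀ row ∈ matrix, row.length = W := by
      rcases hro with h | h
      · exact absurd (by omega : (W:Int) - 1 - corner ≤ 0) hn
      · exact h
    set N : Nat := ((W:Int) - 1 - corner).toNat with hN
    have hH : 0 < (matrix.length : Int) := by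
      cases matrix with
      | nil => exact absurd rfl hne
      | cons r rs => simp
    set v : Int → Int := fun ix => ((matrix.drop corner.toNat).map (fun row => pvInd row ix)).sum with hv
    have hval : ∀ ix : Int, ((PySem.List.pyRange corner (matrix.length:Int) 1).map
        (fun jy => if PySem.List.pyGetD (PySem.List.pyGetD matrix jy []) ix 0 ≠ 0 then (1:Int) else 0)).sum = v ix := by
      intro ix
      exact pv_val_rows matrix corner hc (fun row => if PySem.List.pyGetD row ix 0 ≠ 0 then (1:Int) else 0)
    set sel : Int × Int := List.foldl
        (fun (st : Int × Int) (k : Nat) => if 0 < v (corner + (k:Int)) ∧ v (corner + (k:Int)) ≤ st.1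
          then (v (corner + (k:Int)), corner + (k:Int)) else st) ((matrix.length:Int), -1)
        (List.range N) with hsel
    have hA : move_smallest_column matrix corner =
        if sel.2 < 1 then matrix else
        (matrix.map (fun row =>
          PySem.List.slice row none (some corner) ++ [PySem.List.pyGetD row sel.2 0] ++
          PySem.List.slice row (some (corner + 1)) (some sel.2) ++ [PySem.List.pyGetD row (corner + 1) 0] ++
          PySem.List.slice row (some (sel.2 + 1)) none)).map
          (fun row => row.dropLast ++ [-(row.getLast?.getD 0)]) := by
      simp only [move_smallest_column, hW]
      rw [PySem.List.pyRange_one corner ((W:Int) - 1), List.foldl_map]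
      rw [PySem.List.foldl_congr_mem _ _
        (fun (st : Int × Int) (k : Nat) => if (0 < v (corner + (k:Int)) ∧ v (corner + (k:Int)) < st.2) ∨ v (corner + (k:Int)) = st.2
          then (corner + (k:Int), v (corner + (k:Int))) else st) _
        (by intro acc k hk; simp only [hval])]
      rw [pv_sel_swap (fun k => v (corner + (k:Int))) (fun k => corner + (k:Int)) _ (-1) _ hH]
      rfl
    have hB : move_smallest_column_alt matrix corner =
        if sel.2 < 1 then matrix else
        matrix.map (fun row =>
          PySem.List.slice row none (some corner) ++ [PySem.List.pyGetD row sel.2 0] ++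
          PySem.List.slice row (some (corner + 1)) (some sel.2) ++ [PySem.List.pyGetD row (corner + 1) 0] ++
          PySem.List.slice row (some (sel.2 + 1)) (some (-1)) ++ [-(PySem.List.pyGetD row (-1) 0)]) := by
      simp only [move_smallest_column_alt, hW]
      rw [if_neg hn, PySem.List.slice_from matrix hc]
      have hcc := pv_counts_char corner (matrix.drop corner.toNat) (List.replicate ((W:Int) - 1 - corner).toNat (0:Int))
      set counts : List Int := (matrix.drop corner.toNat).foldl
        (fun cs row => (PySem.List.enumerate cs 0).map
          (fun kc => kc.2 + (if PySem.List.pyGetD row (corner + kc.1) 0 ≠ 0 then (1:Int) else 0)))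
        (List.replicate ((W:Int) - 1 - corner).toNat (0:Int)) with hcounts
      have hlen : counts.length = N := by rw [hcc.1]; simp [hN]
      have hcget : ∀ k : Nat, k < N → counts.getD k 0 = v (corner + (k:Int)) := by
        intro k hk
        rw [hcc.2 k (by rw [List.length_replicate, ← hN]; exact hk)]
        have h0 : (List.replicate ((W:Int) - 1 - corner).toNat (0:Int)).getD k 0 = 0 := by simp
        rw [h0, zero_add]
      have hlenI : PySem.List.len counts = (N : Int) := by simp [PySem.List.len, hlen]
      rw [PySem.List.enumerate_eq_map_pyRange counts 0, hlenI, PySem.List.pyRange_zero_nat,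
        List.foldl_map, List.foldl_map]
      rw [PySem.List.foldl_congr_mem _ _
        (fun (st : Int × Int) (k : Nat) => if 0 < v (corner + (k:Int)) ∧ v (corner + (k:Int)) ≤ st.1
          then (v (corner + (k:Int)), corner + (k:Int)) else st) _
        (by intro acc k hk
            simp only [PySem.List.pyGetD_natCast]
            rw [hcget k (by simpa using hk)])]
    rw [hA, hB]
    by_cases hlt : sel.2 < 1
    · rw [if_pos hlt, if_pos hlt]
    · rw [if_neg hlt, if_neg hlt, List.map_map]
      apply List.map_congr_left
      intro row hrow
      have hrl : row.length = W := hrect row hrow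
      have hbound : sel.2 + 2 ≤ (row.length : Int) := by
        rcases pv_sel_mem (fun k => v (corner + (k:Int))) (fun k => corner + (k:Int)) (List.range N) (-1) (matrix.length:Int) with h1 | ⟨k, hk, h2⟩
        · rw [← hsel] at h1; omega
        · rw [← hsel] at h2
          simp at hk
          rw [hrl]
          omega
      exact pv_row row corner sel.2 (by omega) hbound

-- ===== VERDICT (by name: the statement is the Claim_ definition above) =====
theorem move_smallest_column_spec : Claim_equal_move_smallest_column := by
  intro matrix corner _hdom hpre
  obtain ⟨hne, hc, hro⟩ := hpre
  unfold Spec_move_smallest_column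
  exact pv_main matrix corner hne hc hro
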